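-- pv_equiv track=rewrite | github.com/rathee000001/nyit-gold-intelligence-2026 | deep_ml/scripts/11_governed_feature_store_refresh.py | find_date_column
-- ===== SOURCE A (Python) =====
-- from typing import Any, Dict, Iterable, List, Optional, Tuple
--
-- DATE_COLUMN_CANDIDATES = ["date", "Date", "ds", "timestamp", "time", "observation_date"]
--
-- def find_date_column(columns: Iterable[str]) -> Optional[str]:
--     cols = list(columns)
--     for c in DATE_COLUMN_CANDIDATES:
--         if c in cols:
--             return c
--     for c in cols:
--         if "date" in str(c).lower() or "time" in str(c).lower():
--             return c
--     return None
-- ===== SOURCE B (Python) =====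
-- DATE_COLUMN_CANDIDATES = ["date", "Date", "ds", "timestamp", "time", "observation_date"]
--
-- def find_date_column(columns):
--     # single pass: track the qualifying column with the smallest priority rank
--     # (rank = candidate index for exact candidates, len(candidates) for
--     # substring matches); first occurrence wins on equal rank.
--     best = None
--     best_rank = None
--     for c in columns:
--         try:
--             rank = DATE_COLUMN_CANDIDATES.index(c)
--         except ValueError:
--             s = str(c).lower()
--             if "date" in s or "time" in s:
--                 rank = len(DATE_COLUMN_CANDIDATES)
--             else:
--                 continue
--         if best_rank is None or rank < best_rank:
--             best_rank = rank
--             best = c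
--     return best
-- ===== Notes on version B (the rewrite author's own statement) =====
-- stated objective: alternative
-- what changed: Replaced A's two sequential scans (candidate list checked against the columns, then a substring scan over the columns) by a single pass over the columns that tracks the best-ranked qualifying column (candidate index, or len(candidates) for substring-only matches), first occurrence winning ties.
import Mathlib
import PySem

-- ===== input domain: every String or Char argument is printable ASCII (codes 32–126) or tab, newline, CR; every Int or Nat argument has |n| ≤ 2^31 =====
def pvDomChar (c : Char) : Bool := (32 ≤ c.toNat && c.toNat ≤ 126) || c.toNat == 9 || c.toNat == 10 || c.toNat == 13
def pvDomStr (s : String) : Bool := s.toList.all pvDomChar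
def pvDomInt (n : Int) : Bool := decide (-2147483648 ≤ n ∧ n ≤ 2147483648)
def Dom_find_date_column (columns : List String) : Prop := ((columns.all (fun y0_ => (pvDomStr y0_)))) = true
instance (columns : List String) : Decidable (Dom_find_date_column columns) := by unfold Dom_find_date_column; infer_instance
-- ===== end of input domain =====

-- B replaces A's two sequential scans by a single pass over the columns tracking
-- the best-ranked qualifying column (objective: alternative decomposition, same cost).

-- ===== PORT A =====
def pvCANDS : List String := ["date", "Date", "ds", "timestamp", "time", "observation_date"]

-- "date" in str(c).lower() or "time" in str(c).lower()
def pvIsDateTime (c : String) : Bool :=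
  PySem.Str.isIn "date" (PySem.Str.lower c) || PySem.Str.isIn "time" (PySem.Str.lower c)

def find_date_column (columns : List String) : Option String :=
  match pvCANDS.find? (fun c => columns.contains c) with
  | some c => some c
  | none => columns.find? pvIsDateTime

-- ===== PORT B =====
-- update of (best_rank, best) by a qualifying column c of rank r
def pvUpd (acc : Option (Nat × String)) (r : Nat) (c : String) : Option (Nat × String) :=
  match acc with
  | none => some (r, c)
  | some (br, b) => if r < br then some (r, c) else some (br, b)

def find_date_column_alt (columns : List String) : Option String :=
  (columns.foldl (fun acc c =>
    match PySem.List.index? pvCANDS c with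
    | some r => pvUpd acc r c
    | none => if pvIsDateTime c then pvUpd acc pvCANDS.length c else acc) none).map Prod.snd

-- ===== PRECONDITION & SPEC =====
def Spec_find_date_column (columns : List String) (out : Option String) : Prop := out = find_date_column_alt columns
instance (columns : List String) (out : Option String) : Decidable (Spec_find_date_column columns out) := by unfold Spec_find_date_column; infer_instance

-- ===== CLAIM (what is proved, stated in full; the proofs are below) =====
def Claim_equal_find_date_column : Prop := ∀ (columns : List String), Dom_find_date_column columns → Spec_find_date_column columns (find_date_column columns)

-- ===== LEMMAS AND PROOFS =====

-- the priority key of a column: candidate index, 6 for substring-only matches, none otherwise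
def pvKey (c : String) : Option Nat :=
  match PySem.List.index? pvCANDS c with
  | some r => some r
  | none => if pvIsDateTime c then some 6 else none

-- merging one leading qualifying column (rank r, value c) into a later best
def pvMerge (r : Nat) (c : String) (m : Option (Nat × String)) : Option (Nat × String) :=
  match m with
  | none => some (r, c)
  | some (r', c') => if r ≤ r' then some (r, c) else some (r', c')

-- right-fold formulation of B's loop: earliest column of minimal key
def pvPick : List String → Option (Nat × String)
  | [] => none
  | c :: rest =>
    match pvKey c with
    | none => pvPick rest
    | some r => pvMerge r c (pvPick rest)

def pvCombine (acc m : Option (Nat × String)) : Option (Nat × String) :=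
  match acc, m with
  | none, m => m
  | some a, none => some a
  | some (br, b), some (r', c') => if r' < br then some (r', c') else some (br, b)

theorem pvStep_eq (acc : Option (Nat × String)) (c : String) :
    (match PySem.List.index? pvCANDS c with
      | some r => pvUpd acc r c
      | none => if pvIsDateTime c then pvUpd acc pvCANDS.length c else acc)
    = match pvKey c with
      | none => acc
      | some r => pvUpd acc r c := by
  unfold pvKey
  cases h : PySem.List.index? pvCANDS c with
  | some r => simp
  | none =>
    by_cases hp : pvIsDateTime c
    · simp [hp]; rfl
    · simp [hp]

theorem pvCombine_upd (a m' : Option (Nat × String)) (r : Nat) (c : String) :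
    pvCombine (pvUpd a r c) m' = pvCombine a (pvMerge r c m') := by
  cases a with
  | none =>
    cases m' with
    | none => rfl
    | some p' =>
      obtain ⟨r', c'⟩ := p'
      by_cases h : r ≤ r'
      · simp [pvUpd, pvCombine, pvMerge, h, show ¬ r' < r by omega]
      · simp [pvUpd, pvCombine, pvMerge, h, show r' < r by omega]
  | some p =>
    obtain ⟨br, b⟩ := p
    cases m' with
    | none =>
      by_cases h : r < br <;> simp [pvUpd, pvCombine, pvMerge, h]
    | some p' =>
      obtain ⟨r', c'⟩ := p'
      by_cases h1 : r < br
      · by_cases h2 : r ≤ r'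
        · simp [pvUpd, pvCombine, pvMerge, h1, h2, show ¬ r' < r by omega]
        · simp [pvUpd, pvCombine, pvMerge, h1, h2, show r' < r by omega,
                show r' < br by omega]
      · by_cases h2 : r ≤ r'
        · simp [pvUpd, pvCombine, pvMerge, h1, h2, show ¬ r' < br by omega]
        · simp [pvUpd, pvCombine, pvMerge, h1, h2]

theorem pvPick_cons (c : String) (rest : List String) :
    pvPick (c :: rest) = match pvKey c with
      | none => pvPick rest
      | some r => pvMerge r c (pvPick rest) := rfl

theorem pvFoldl_eq_combine (l : List String) : ∀ acc : Option (Nat × String),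
    (l.foldl (fun acc c =>
      match PySem.List.index? pvCANDS c with
      | some r => pvUpd acc r c
      | none => if pvIsDateTime c then pvUpd acc pvCANDS.length c else acc) acc)
    = pvCombine acc (pvPick l) := by
  induction l with
  | nil => intro acc; cases acc <;> rfl
  | cons c rest ih =>
    intro acc
    rw [List.foldl_cons, pvStep_eq, ih, pvPick_cons]
    cases hk : pvKey c with
    | none => rfl
    | some r => exact pvCombine_upd acc (pvPick rest) r c

theorem pvAlt_eq_pick (l : List String) :
    find_date_column_alt l = (pvPick l).map Prod.snd := by
  unfold find_date_column_alt
  rw [pvFoldl_eq_combine]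
  rfl

theorem pvKey_lt6 (c : String) {r : Nat} (h : pvKey c = some r) (hr : r < 6) :
    PySem.List.index? pvCANDS c = some r := by
  unfold pvKey at h
  cases hi : PySem.List.index? pvCANDS c with
  | some j =>
    rw [hi] at h
    simp at h
    subst h
    rfl
  | none =>
    rw [hi] at h
    by_cases hp : pvIsDateTime c <;> simp [hp] at h
    omega

theorem pvKey_of_not_mem (c : String) (hc : c ∉ pvCANDS) :
    pvKey c = if pvIsDateTime c then some 6 else none := by
  unfold pvKey
  rw [(PySem.List.index?_eq_none_iff ..).mpr hc]

-- structure of pick's result: earliest column of minimal key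
theorem pvPick_char : ∀ l : List String,
    (pvPick l = none ∧ ∀ x ∈ l, pvKey x = none) ∨
    (∃ r x as bs, pvPick l = some (r, x) ∧ l = as ++ x :: bs ∧ pvKey x = some r ∧
      (∀ a ∈ as, ∀ r', pvKey a = some r' → r < r') ∧
      (∀ b ∈ bs, ∀ r', pvKey b = some r' → r ≤ r')) := by
  intro l
  induction l with
  | nil => left; simp [pvPick]
  | cons c rest ih =>
    cases hk : pvKey c with
    | none =>
      rcases ih with ⟨hm, hall⟩ | ⟨r, x, as, bs, hm, hdec, hkx, has, hbs⟩
      · left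
        constructor
        · simp [pvPick, hk, hm]
        · intro x hx
          rcases List.mem_cons.mp hx with hx | hx
          · exact hx ▸ hk
          · exact hall x hx
      · right
        refine ⟨r, x, c :: as, bs, ?_, by simp [hdec], hkx, ?_, hbs⟩
        · simp [pvPick, hk, hm]
        · intro a ha r' hr'
          rcases List.mem_cons.mp ha with ha | ha
          · rw [ha, hk] at hr'; cases hr'
          · exact has a ha r' hr'
    | some r =>
      rcases ih with ⟨hm, hall⟩ | ⟨r', x', as', bs', hm, hdec, hkx, has, hbs⟩
      · right
        refine ⟨r, c, [], rest, ?_, by simp, hk, by simp, ?_⟩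
        · simp [pvPick, pvMerge, hk, hm]
        · intro b hb r' hr'
          rw [hall b hb] at hr'; cases hr'
      · by_cases hle : r ≤ r'
        · right
          refine ⟨r, c, [], rest, ?_, by simp, hk, by simp, ?_⟩
          · simp [pvPick, pvMerge, hk, hm, hle]
          · intro b hb r'' hr''
            subst hdec
            rcases List.mem_append.mp hb with hb | hb
            · have := has b hb r'' hr''; omega
            · rcases List.mem_cons.mp hb with hb | hb
              · rw [hb, hkx] at hr''
                injection hr'' with h; omega
              · have := hbs b hb r'' hr''; omega
        · right
          refine ⟨r', x', c :: as', bs', ?_, by simp [hdec], hkx, ?_, hbs⟩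
          · simp [pvPick, pvMerge, hk, hm, hle]
          · intro a ha r'' hr''
            rcases List.mem_cons.mp ha with ha | ha
            · rw [ha, hk] at hr''
              injection hr'' with h; omega
            · exact has a ha r'' hr''

-- main equivalence
theorem pvMain (cols : List String) :
    find_date_column cols = find_date_column_alt cols := by
  rw [pvAlt_eq_pick]
  unfold find_date_column
  cases hf : pvCANDS.find? (fun c => cols.contains c) with
  | some c0 =>
    -- A returns the first candidate present in cols
    obtain ⟨hc0, ascand, suf0, hcands, hpre⟩ := List.find?_eq_some_iff_append.mp hf
    simp at hc0
    have hc0mem : c0 ∈ pvCANDS := by rw [hcands]; simp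
    obtain ⟨j, hj⟩ := Option.isSome_iff_exists.mp
      ((PySem.List.index?_isSome_iff pvCANDS c0).mpr hc0mem)
    have hk0 : pvKey c0 = some j := by unfold pvKey; rw [hj]
    have hj6 : j < 6 := by
      have ⟨hjl, _⟩ := PySem.List.getElem_of_index?_eq_some hj
      simpa [pvCANDS] using hjl
    rcases pvPick_char cols with ⟨hm, hall⟩ | ⟨r, x, as, bs, hm, hdec, hkx, has, hbs⟩
    · exfalso
      rw [hall c0 hc0] at hk0
      cases hk0
    · rw [hm]
      have hxr : r < 6 := by
        subst hdec
        rcases List.mem_append.mp hc0 with h | h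
        · have := has c0 h j hk0; omega
        · rcases List.mem_cons.mp h with h | h
          · rw [h, hkx] at hk0; injection hk0 with h'; omega
          · have := hbs c0 h j hk0; omega
      have hix : PySem.List.index? pvCANDS x = some r := pvKey_lt6 x hkx hxr
      obtain ⟨pre, suf, hc2, hlen, hnp⟩ := (PySem.List.index?_eq_some_iff ..).mp hix
      -- every candidate before x is not in cols
      have hpre2 : ∀ a ∈ pre, a ∉ cols := by
        intro a ha hacols
        obtain ⟨j', hj'⟩ := Option.isSome_iff_exists.mp
          ((PySem.List.index?_isSome_iff pre a).mpr ha)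
        have hja : PySem.List.index? pvCANDS a = some j' := by
          rw [hc2, show (x :: suf) = [x] ++ suf from rfl, ← List.append_assoc]
          rw [PySem.List.index?_append_of_mem _ (by simp [ha])]
          rw [PySem.List.index?_append_of_mem _ ha]
          exact hj'
        have hjlt : j' < r := by
          have ⟨hjl, _⟩ := PySem.List.getElem_of_index?_eq_some hj'
          omega
        have hka : pvKey a = some j' := by unfold pvKey; rw [hja]
        subst hdec
        rcases List.mem_append.mp hacols with h | h
        · have := has a h j' hka; omega
        · rcases List.mem_cons.mp h with h | h
          · rw [h, hkx] at hka; injection hka with h'; omega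
          · have := hbs a h j' hka; omega
      have hfx : pvCANDS.find? (fun c => cols.contains c) = some x := by
        apply List.find?_eq_some_iff_append.mpr
        refine ⟨by simp [hdec], pre, suf, hc2, ?_⟩
        intro a ha
        simpa using hpre2 a ha
      rw [hf] at hfx
      injection hfx with hfx
      simp [hfx]
  | none =>
    -- no candidate occurs in cols
    have hnone : ∀ y ∈ pvCANDS, y ∉ cols := by
      intro y hy
      have := List.find?_eq_none.mp hf y hy
      simpa using this
    rcases pvPick_char cols with ⟨hm, hall⟩ | ⟨r, x, as, bs, hm, hdec, hkx, has, hbs⟩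
    · -- pick = none: no column qualifies, so the substring find? is none too
      have hfn : cols.find? pvIsDateTime = none := by
        apply List.find?_eq_none.mpr
        intro y hy
        have := hall y hy
        have hyn : y ∉ pvCANDS := fun hc => hnone y hc hy
        rw [pvKey_of_not_mem y hyn] at this
        by_cases hp : pvIsDateTime y
        · rw [if_pos hp] at this; cases this
        · simpa using hp
      rw [hm, hfn]
      rfl
    · -- pick = first substring-qualifying column x; A's find? returns the same
      rw [hm]
      have hx : x ∈ cols := by simp [hdec]
      have hxn : x ∉ pvCANDS := fun hc => hnone x hc hx
      have hkx2 : (if pvIsDateTime x then some 6 else none) = some r :=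
        (pvKey_of_not_mem x hxn) ▸ hkx
      have hpx : pvIsDateTime x = true := by
        by_contra hp
        simp at hp
        rw [if_neg (by simp [hp])] at hkx2
        cases hkx2
      have hr6 : r = 6 := by
        rw [if_pos hpx] at hkx2
        injection hkx2 with h
        omega
      have hfind : cols.find? pvIsDateTime = some x := by
        apply List.find?_eq_some_iff_append.mpr
        refine ⟨hpx, as, bs, hdec, ?_⟩
        intro a ha
        have hacols : a ∈ cols := by rw [hdec]; simp [ha]
        have han : a ∉ pvCANDS := fun hc => hnone a hc hacols
        by_contra hpa
        simp at hpa
        have hka : pvKey a = some 6 := by rw [pvKey_of_not_mem a han, if_pos hpa]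
        have := has a ha 6 hka
        omega
      rw [hfind]
      rfl

-- ===== VERDICT (by name: the statement is the Claim_ definition above) =====
theorem find_date_column_spec : Claim_equal_find_date_column := by
  intro columns _
  unfold Spec_find_date_column
  exact pvMain columns
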